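-- pv_equiv track=rewrite | github.com/hfiamelgringo/H.F-Capital-CRM | leads/scoring.py | get_job_title_score
-- ===== SOURCE A (Python) =====
-- def get_job_title_score(job_title: str) -> int:
--     """Calculate score based on job title."""
--     if not job_title:
--         return 0
--
--     job_title_lower = job_title.lower()
--
--     # Check for CISO/CTO first (highest priority)
--     if 'ciso' in job_title_lower or 'chief information' in job_title_lower:
--         return 20
--     if 'cto' in job_title_lower or 'chief technology' in job_title_lower:
--         return 20
--
--     # Check for VP/Director
--     if 'vp ' in job_title_lower or 'vice president' in job_title_lower:
--         return 15
--     if 'director' in job_title_lower: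
--         return 15
--
--     # Check for Manager
--     if 'manager' in job_title_lower:
--         return 10
--
--     # Check for Senior
--     if 'senior' in job_title_lower:
--         return 8
--
--     # Default for IC roles
--     for keyword in ['engineer', 'developer', 'analyst', 'specialist']:
--         if keyword in job_title_lower:
--             return 5
--
--     return 0
-- ===== SOURCE B (Python) =====
-- KEYWORD_SCORES = [
--     ('ciso', 20), ('chief information', 20), ('cto', 20), ('chief technology', 20),
--     ('vp ', 15), ('vice president', 15), ('director', 15),
--     ('manager', 10),
--     ('senior', 8),
--     ('engineer', 5), ('developer', 5), ('analyst', 5), ('specialist', 5),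
-- ]
--
--
-- def get_job_title_score(job_title: str) -> int:
--     """Calculate score based on job title."""
--     title = job_title.lower()
--     return max((score for keyword, score in KEYWORD_SCORES if keyword in title),
--                default=0)
-- ===== Notes on version B (the rewrite author's own statement) =====
-- stated objective: simpler
-- what changed: The nine-branch if-cascade (plus a trailing keyword loop and an empty-string guard) is replaced by one keyword->score table and a single max over the scores of all matching keywords, which coincides with the first-match cascade because the table's scores are non-increasing; the empty-string guard disappears since no keyword matches the empty string.
import Mathlib
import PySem

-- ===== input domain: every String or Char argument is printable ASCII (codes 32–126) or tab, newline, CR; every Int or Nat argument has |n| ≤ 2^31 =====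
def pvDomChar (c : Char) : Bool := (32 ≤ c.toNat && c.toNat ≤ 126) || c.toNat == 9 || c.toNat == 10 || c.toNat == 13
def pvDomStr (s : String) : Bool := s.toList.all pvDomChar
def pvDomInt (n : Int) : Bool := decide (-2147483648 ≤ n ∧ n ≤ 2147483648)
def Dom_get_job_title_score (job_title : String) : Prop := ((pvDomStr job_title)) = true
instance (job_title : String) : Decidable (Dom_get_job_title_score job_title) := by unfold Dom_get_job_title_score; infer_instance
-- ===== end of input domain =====

-- B replaces A's if-cascade (with empty-string guard and trailing keyword loop) by a
-- keyword->score table and a single max over the scores of all matching keywords (simpler).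


-- ===== PORT A =====
-- A's final 'for keyword in [...]' loop, step for step
def pvIcLoop (kws : List String) (t : String) : Int :=
  match kws with
  | [] => 0
  | kw :: rest => if PySem.Str.isIn kw t then 5 else pvIcLoop rest t

def get_job_title_score (job_title : String) : Int :=
  if job_title = "" then 0
  else
    let t := PySem.Str.lower job_title
    if PySem.Str.isIn "ciso" t || PySem.Str.isIn "chief information" t then 20
    else if PySem.Str.isIn "cto" t || PySem.Str.isIn "chief technology" t then 20
    else if PySem.Str.isIn "vp " t || PySem.Str.isIn "vice president" t then 15
    else if PySem.Str.isIn "director" t then 15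
    else if PySem.Str.isIn "manager" t then 10
    else if PySem.Str.isIn "senior" t then 8
    else pvIcLoop ["engineer", "developer", "analyst", "specialist"] t

-- ===== PORT B =====
def KEYWORD_SCORES : List (String × Int) :=
  [("ciso", 20), ("chief information", 20), ("cto", 20), ("chief technology", 20),
   ("vp ", 15), ("vice president", 15), ("director", 15),
   ("manager", 10),
   ("senior", 8),
   ("engineer", 5), ("developer", 5), ("analyst", 5), ("specialist", 5)]

def get_job_title_score_alt (job_title : String) : Int :=
  let t := PySem.Str.lower job_title
  -- max((score for keyword, score in KEYWORD_SCORES if keyword in title), default=0)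
  (PySem.List.max?
    ((KEYWORD_SCORES.filter (fun p => PySem.Str.isIn p.1 t)).map (fun p => p.2))
    (fun x => x)).getD 0

-- ===== PRECONDITION & SPEC =====
def Spec_get_job_title_score (job_title : String) (out : Int) : Prop := out = get_job_title_score_alt job_title
instance (job_title : String) (out : Int) : Decidable (Spec_get_job_title_score job_title out) := by unfold Spec_get_job_title_score; infer_instance

-- ===== CLAIM (what is proved, stated in full; the proofs are below) =====
def Claim_equal_get_job_title_score : Prop := ∀ (job_title : String), Dom_get_job_title_score job_title → Spec_get_job_title_score job_title (get_job_title_score job_title)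

-- ===== LEMMAS AND PROOFS =====

-- first-match over a (matched?, score) table: the shape of A's cascade
def pvFirstMatch : List (Bool × Int) → Int
  | [] => 0
  | (b, s) :: r => if b then s else pvFirstMatch r

-- max-of-matching-scores over a table: the shape of B
def pvMaxSel (tbl : List (Bool × Int)) : Int :=
  (PySem.List.max? ((tbl.filter (fun p => p.1)).map (fun p => p.2)) (fun x => x)).getD 0

-- push the predicate into the table (generic)
theorem pvBoolify {α : Type} (q : α → Bool) (xs : List (α × Int)) :
    (xs.filter (fun p => q p.1)).map (fun p => p.2) =
    ((xs.map (fun p => (q p.1, p.2))).filter (fun p => p.1)).map (fun p => p.2) := by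
  induction xs with
  | nil => simp
  | cons a r ih =>
    cases hq : q a.1 <;> simp [hq, ih]

-- on a table with non-increasing scores, first match = max of matches
theorem pvFirstMatch_eq_pvMaxSel (tbl : List (Bool × Int))
    (h : (tbl.map (fun p => p.2)).Pairwise (fun a b => b ≤ a)) :
    pvFirstMatch tbl = pvMaxSel tbl := by
  induction tbl with
  | nil => simp [pvFirstMatch, pvMaxSel, PySem.List.max?]
  | cons p r ih =>
    simp only [List.map_cons, List.pairwise_cons] at h
    cases hb : p.1 with
    | false =>
      simp only [pvFirstMatch, pvMaxSel, List.filter_cons, hb, if_neg Bool.false_ne_true]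
      exact ih h.2
    | true =>
      have hle : ∀ y ∈ (r.filter (fun p => p.1)).map (fun p => p.2), y ≤ p.2 := by
        intro y hy
        rcases List.mem_map.mp hy with ⟨q, hq, rfl⟩
        exact h.1 q.2 (List.mem_map_of_mem (List.mem_of_mem_filter hq))
      have key : List.foldl max p.2 ((r.filter (fun p => p.1)).map (fun p => p.2)) = p.2 := by
        rcases PySem.List.foldl_max_mem ((r.filter (fun p => p.1)).map (fun p => p.2)) p.2 with
          heq | hmem
        · exact heq
        · exact le_antisymm (hle _ hmem) ((PySem.List.le_foldl_max _ _).1)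
      simp [pvFirstMatch, pvMaxSel, hb, PySem.List.max?_id_cons, key]

-- ===== VERDICT (by name: the statement is the Claim_ definition above) =====
theorem get_job_title_score_spec : Claim_equal_get_job_title_score := by
  intro jt _
  unfold Spec_get_job_title_score
  by_cases h : jt = ""
  · subst h; decide
  · show get_job_title_score jt = get_job_title_score_alt jt
    have hB : get_job_title_score_alt jt =
        pvMaxSel (KEYWORD_SCORES.map (fun p => (PySem.Str.isIn p.1 (PySem.Str.lower jt), p.2))) := by
      simp only [get_job_title_score_alt, pvMaxSel,
        pvBoolify (fun kw => PySem.Str.isIn kw (PySem.Str.lower jt)) KEYWORD_SCORES]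
    have hpw : ((KEYWORD_SCORES.map (fun p => (PySem.Str.isIn p.1 (PySem.Str.lower jt), p.2))).map
        (fun p => p.2)).Pairwise (fun a b => b ≤ a) := by
      simp only [KEYWORD_SCORES, List.map_cons, List.map_nil]
      decide
    rw [hB, ← pvFirstMatch_eq_pvMaxSel _ hpw]
    simp only [get_job_title_score, pvIcLoop, KEYWORD_SCORES, List.map_cons, List.map_nil,
      if_neg h, pvFirstMatch]
    generalize (PySem.Str.isIn "ciso" (PySem.Str.lower jt)) = b1
    generalize (PySem.Str.isIn "chief information" (PySem.Str.lower jt)) = b2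
    generalize (PySem.Str.isIn "cto" (PySem.Str.lower jt)) = b3
    generalize (PySem.Str.isIn "chief technology" (PySem.Str.lower jt)) = b4
    generalize (PySem.Str.isIn "vp " (PySem.Str.lower jt)) = b5
    generalize (PySem.Str.isIn "vice president" (PySem.Str.lower jt)) = b6
    generalize (PySem.Str.isIn "director" (PySem.Str.lower jt)) = b7
    generalize (PySem.Str.isIn "manager" (PySem.Str.lower jt)) = b8
    generalize (PySem.Str.isIn "senior" (PySem.Str.lower jt)) = b9
    generalize (PySem.Str.isIn "engineer" (PySem.Str.lower jt)) = b10
    generalize (PySem.Str.isIn "developer" (PySem.Str.lower jt)) = b11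
    generalize (PySem.Str.isIn "analyst" (PySem.Str.lower jt)) = b12
    generalize (PySem.Str.isIn "specialist" (PySem.Str.lower jt)) = b13
    cases b1 <;> cases b2 <;> cases b3 <;> cases b4 <;> cases b5 <;> cases b6 <;> simp
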